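-- pv_equiv track=rewrite | github.com/jcbfshr/card-game | cardGame.py | round_winner
-- ===== SOURCE A (Python) =====
-- def round_winner(card1,card2):
--     if card1[0] == card2[0]:
--         return "p1" if card1[1] > card2[1] else "p2"
--     else:
--         for i in range(2):
--             if card1[0] == "red" and card2[0] == "black":
--                 return "p1" if i == 0 else "p2"
--             if card1[0] == "yellow" and card2[0] == "red":
--                 return "p1" if i == 0 else "p2"
--             if card1[0] == "black" and card2[0] == "yellow":
--                 return "p1" if i == 0 else "p2"
--             # reverse order of cards to find winner if not already found
--             card1,card2 = card2,card1
-- ===== SOURCE B (Python) =====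
-- _RANK = {"red": 0, "yellow": 1, "black": 2}
--
-- def round_winner(card1, card2):
--     if card1[0] == card2[0]:
--         return "p1" if card1[1] > card2[1] else "p2"
--     r1 = _RANK.get(card1[0])
--     r2 = _RANK.get(card2[0])
--     if r1 is None or r2 is None:
--         return None
--     return "p1" if (r1 - r2) % 3 == 1 else "p2"
-- ===== Notes on version B (the rewrite author's own statement) =====
-- stated objective: alternative
-- what changed: Exploits that the three colours form a 3-cycle: B maps each colour to a rank 0/1/2 and decides the winner by (r1-r2) mod 3 arithmetic, replacing A's two-iteration swap loop over three explicit rules.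
import Mathlib
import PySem

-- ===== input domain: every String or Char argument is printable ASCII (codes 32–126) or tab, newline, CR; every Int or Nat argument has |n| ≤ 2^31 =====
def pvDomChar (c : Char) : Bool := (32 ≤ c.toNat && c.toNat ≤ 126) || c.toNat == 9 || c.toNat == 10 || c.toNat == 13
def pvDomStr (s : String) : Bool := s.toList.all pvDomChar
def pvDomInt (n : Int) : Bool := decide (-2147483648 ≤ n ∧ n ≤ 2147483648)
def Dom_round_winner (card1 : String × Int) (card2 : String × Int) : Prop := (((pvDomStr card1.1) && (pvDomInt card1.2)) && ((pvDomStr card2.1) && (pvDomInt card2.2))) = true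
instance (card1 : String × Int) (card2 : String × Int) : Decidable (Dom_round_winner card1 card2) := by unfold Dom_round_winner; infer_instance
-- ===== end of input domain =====

-- B replaces A's two-iteration swap loop over three explicit colour rules with cyclic-rank
-- arithmetic: each colour gets a rank 0/1/2 and the winner is decided by (r1-r2) mod 3
-- (objective: alternative).


-- ===== PORT A =====
-- the 'for i in range(2)' loop with the card swap at the end of each iteration
def pvLoopA (i : Nat) (card1 card2 : String × Int) : Option String :=
  if i < 2 then
    if card1.1 == "red" && card2.1 == "black" then
      some (if i == 0 then "p1" else "p2")
    else if card1.1 == "yellow" && card2.1 == "red" then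
      some (if i == 0 then "p1" else "p2")
    else if card1.1 == "black" && card2.1 == "yellow" then
      some (if i == 0 then "p1" else "p2")
    else
      pvLoopA (i + 1) card2 card1
  else
    none
termination_by 2 - i

def round_winner (card1 : String × Int) (card2 : String × Int) : Option String :=
  if card1.1 == card2.1 then
    some (if card1.2 > card2.2 then "p1" else "p2")
  else
    pvLoopA 0 card1 card2

-- ===== PORT B =====
-- _RANK.get(colour): the cyclic rank of a colour, none for unknown colours
def pvRank (s : String) : Option Int :=
  if s == "red" then some 0
  else if s == "yellow" then some 1
  else if s == "black" then some 2
  else none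

def round_winner_alt (card1 : String × Int) (card2 : String × Int) : Option String :=
  if card1.1 == card2.1 then
    some (if card1.2 > card2.2 then "p1" else "p2")
  else
    match pvRank card1.1, pvRank card2.1 with
    | some r1, some r2 => some (if PySem.Int.mod (r1 - r2) 3 == 1 then "p1" else "p2")
    | _, _ => none

-- ===== PRECONDITION & SPEC =====
def Spec_round_winner (card1 : String × Int) (card2 : String × Int) (out : Option String) : Prop := out = round_winner_alt card1 card2
instance (card1 : String × Int) (card2 : String × Int) (out : Option String) : Decidable (Spec_round_winner card1 card2 out) := by unfold Spec_round_winner; infer_instance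

-- ===== CLAIM (what is proved, stated in full; the proofs are below) =====
def Claim_equal_round_winner : Prop := ∀ (card1 : String × Int) (card2 : String × Int), Dom_round_winner card1 card2 → Spec_round_winner card1 card2 (round_winner card1 card2)

-- ===== LEMMAS AND PROOFS =====
set_option maxHeartbeats 1000000 in
theorem pvLoopA_eq (card1 card2 : String × Int) (h : ¬ card1.1 = card2.1) :
    pvLoopA 0 card1 card2 =
      match pvRank card1.1, pvRank card2.1 with
      | some r1, some r2 => some (if PySem.Int.mod (r1 - r2) 3 == 1 then "p1" else "p2")
      | _, _ => none := by
  unfold pvLoopA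
  unfold pvLoopA
  unfold pvLoopA
  unfold pvRank
  simp only [beq_iff_eq, Bool.and_eq_true]
  split_ifs <;> simp_all

-- ===== VERDICT (by name: the statement is the Claim_ definition above) =====
theorem round_winner_spec : Claim_equal_round_winner := by
  intro card1 card2 _
  unfold Spec_round_winner round_winner round_winner_alt
  by_cases h : card1.1 = card2.1
  · simp [h]
  · simp only [beq_iff_eq, h, if_false, pvLoopA_eq card1 card2 h]
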